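-- pv_equiv track=rewrite | github.com/rahulpatel-blink/game | game.py | construct_initial_grid
-- ===== SOURCE A (Python) =====
-- def construct_initial_grid(seed_string):
--     grid = []
--     row = 0
--     for line in seed_string.split("\n"):
--         col = 0
--         for elem in get_cell_value(line):
--             if elem == "[X]":
--                 grid.append((int(row), int(col)))
--             col += 1
--         row += 1
--     return grid
--
-- def get_cell_value(line):
--     elements = []
--     str = ""
--     for char in line:
--         if char != ']':
--             str += char
--         else:
--             str += char
--             elements.append(str)
--             str = ""
--     return elements
-- ===== SOURCE B (Python) =====
-- def construct_initial_grid(seed_string):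
--     grid = []
--     for row, line in enumerate(seed_string.split("\n")):
--         cells = line.split("]")
--         for col, piece in enumerate(cells[:-1]):
--             if piece == "[X":
--                 grid.append((row, col))
--     return grid
-- ===== Notes on version B (the rewrite author's own statement) =====
-- stated objective: idiomatic
-- what changed: Replaces the hand-rolled character-accumulation tokenizer (get_cell_value) and manual row/col counters with a per-line str.split on the closing bracket, dropping the trailing unterminated piece, and enumerate for the indices (split runs in C, hence the constant-factor speedup).
import Mathlib
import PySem

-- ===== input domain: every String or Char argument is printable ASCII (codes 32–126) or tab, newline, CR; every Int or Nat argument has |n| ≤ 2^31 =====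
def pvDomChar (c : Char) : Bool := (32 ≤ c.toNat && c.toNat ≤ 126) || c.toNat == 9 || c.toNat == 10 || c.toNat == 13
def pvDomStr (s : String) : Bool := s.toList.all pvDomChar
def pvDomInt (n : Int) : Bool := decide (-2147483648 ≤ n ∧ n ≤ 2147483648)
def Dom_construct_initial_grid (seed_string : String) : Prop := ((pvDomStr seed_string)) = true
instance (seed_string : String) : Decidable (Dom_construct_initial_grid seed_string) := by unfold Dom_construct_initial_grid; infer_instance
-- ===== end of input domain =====

-- B replaces A's hand-rolled character-accumulation tokenizer and manual row/col counters
-- with a per-line split on ']' (dropping the trailing unterminated piece) plus enumerate.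

-- ===== PORT A =====
-- helper get_cell_value: fold over the line's characters with state (elements, str)
def gcvStep (st : List (List Char) × List Char) (char : Char) : List (List Char) × List Char :=
  if char ≠ ']' then (st.1, st.2 ++ [char])
  else (st.1 ++ [st.2 ++ [char]], [])

def get_cell_value (line : List Char) : List (List Char) :=
  (line.foldl gcvStep ([], [])).1

def construct_initial_grid (seed_string : String) : List (Int × Int) :=
  ((PySem.Chars.splitOn seed_string.toList ['\n']).foldl
    (fun (st : List (Int × Int) × Int) line =>
      (((get_cell_value line).foldl
          (fun (st2 : List (Int × Int) × Int) elem =>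
            (if elem = "[X]".toList then st2.1 ++ [(st.2, st2.2)] else st2.1, st2.2 + 1))
          (st.1, (0 : Int))).1,
       st.2 + 1))
    ([], (0 : Int))).1

-- ===== PORT B =====
def construct_initial_grid_alt (seed_string : String) : List (Int × Int) :=
  (PySem.List.enumerate (PySem.Chars.splitOn seed_string.toList ['\n']) 0).foldl
    (fun grid rl =>
      (PySem.List.enumerate
          (PySem.List.slice (PySem.Chars.splitOn rl.2 [']']) none (some (-1))) 0).foldl
        (fun g cp => if cp.2 = "[X".toList then g ++ [(rl.1, cp.1)] else g)
        grid)
    []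

-- ===== PRECONDITION & SPEC =====
def Spec_construct_initial_grid (seed_string : String) (out : List (Int × Int)) : Prop := out = construct_initial_grid_alt seed_string
instance (seed_string : String) (out : List (Int × Int)) : Decidable (Spec_construct_initial_grid seed_string out) := by unfold Spec_construct_initial_grid; infer_instance

-- ===== CLAIM (what is proved, stated in full; the proofs are below) =====
def Claim_equal_construct_initial_grid : Prop := ∀ (seed_string : String), Dom_construct_initial_grid seed_string → Spec_construct_initial_grid seed_string (construct_initial_grid seed_string)

-- ===== LEMMAS AND PROOFS =====

-- the list of pieces strictly between the ']' separators (with `cur` the piece being built)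
def split1 (l : List Char) (cur : List Char) : List (List Char) :=
  match l with
  | [] => [cur]
  | c :: rest => if c = ']' then cur :: split1 rest [] else split1 rest (cur ++ [c])

theorem split1_ne_nil (l cur : List Char) : split1 l cur ≠ [] := by
  cases l with
  | nil => simp [split1]
  | cons c rest => by_cases h : c = ']' <;> simp [split1, h]; exact split1_ne_nil rest _

theorem go_succ (sep : List Char) (f : Nat) (c : Char) (rest cur : List Char) (acc : List (List Char)) :
    PySem.Chars.splitOn.go sep (f+1) (c::rest) cur acc =
      if sep.isPrefixOf (c::rest) then
        PySem.Chars.splitOn.go sep f (List.drop sep.length (c::rest)) [] (cur.reverse :: acc)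
      else PySem.Chars.splitOn.go sep f rest (c :: cur) acc := rfl

theorem go_bracket (l : List Char) : ∀ (fuel : Nat) (cur : List Char) (acc : List (List Char)),
    l.length ≤ fuel →
    PySem.Chars.splitOn.go [']'] fuel l cur acc = acc.reverse ++ split1 l cur.reverse := by
  induction l with
  | nil =>
    intro fuel cur acc _
    cases fuel <;> simp [PySem.Chars.splitOn.go, split1]
  | cons c rest ih =>
    intro fuel cur acc hlen
    cases fuel with
    | zero => simp at hlen
    | succ f =>
      rw [go_succ]
      simp only [List.length_cons] at hlen
      by_cases h : c = ']'
      · subst h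
        rw [if_pos (by simp [List.isPrefixOf])]
        simp only [List.length_cons, List.length_nil, List.drop_succ_cons, List.drop_zero,
          Nat.zero_add]
        rw [ih f [] (List.reverse cur :: acc) (by omega)]
        simp [split1]
      · rw [if_neg (by simp [List.isPrefixOf]; intro hc; exact h hc.symm)]
        rw [ih f (c :: cur) acc (by omega)]
        simp [split1, h]

theorem splitOn_bracket (l : List Char) :
    PySem.Chars.splitOn l [']'] = split1 l [] := by
  unfold PySem.Chars.splitOn
  rw [go_bracket l (l.length + 1) [] [] (by omega)]
  simp

theorem gcv_fold (l : List Char) : ∀ (els : List (List Char)) (cur : List Char),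
    (l.foldl gcvStep (els, cur)).1
      = els ++ (split1 l cur).dropLast.map (· ++ [']']) := by
  induction l with
  | nil => intro els cur; simp [split1]
  | cons c rest ih =>
    intro els cur
    rw [List.foldl_cons]
    by_cases h : c = ']'
    · subst h
      have hs : gcvStep (els, cur) ']' = (els ++ [cur ++ [']']], []) := by simp [gcvStep]
      rw [hs, ih]
      have hsp : split1 (']' :: rest) cur = cur :: split1 rest [] := by simp [split1]
      rw [hsp, List.dropLast_cons_of_ne_nil (split1_ne_nil rest [])]
      simp
    · have hs : gcvStep (els, cur) c = (els, cur ++ [c]) := by simp [gcvStep, h]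
      rw [hs, ih]
      simp [split1, h]

theorem get_cell_value_eq (l : List Char) :
    get_cell_value l = ((PySem.Chars.splitOn l [']']).dropLast).map (· ++ [']']) := by
  rw [splitOn_bracket]
  exact gcv_fold l [] []

theorem counter_fold {α β : Type} (F : Int → β → α → β) (l : List α) :
    ∀ (g : β) (c0 : Int),
    (l.foldl (fun (st : β × Int) x => (F st.2 st.1 x, st.2 + 1)) (g, c0)).1
      = (PySem.List.enumerate l c0).foldl (fun g2 ix => F ix.1 g2 ix.2) g := by
  induction l with
  | nil => intro g c0; simp [PySem.List.enumerate]
  | cons x xs ih => intro g c0; rw [PySem.List.enumerate_cons]; simp only [List.foldl_cons]; exact ih _ _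

theorem enumerate_map {α β : Type} (f : α → β) (l : List α) : ∀ (s : Int),
    PySem.List.enumerate (l.map f) s = (PySem.List.enumerate l s).map (fun p => (p.1, f p.2)) := by
  induction l with
  | nil => intro s; simp [PySem.List.enumerate]
  | cons x xs ih => intro s; simp [PySem.List.enumerate_cons, ih]

theorem slice_neg_one {α : Type} (xs : List α) :
    PySem.List.slice xs none (some (-1)) = xs.dropLast := by
  simp [PySem.List.slice, PySem.List.clampIdx, List.dropLast_eq_take]
  cases xs <;> simp

theorem suffix_test (x : List Char) :
    (x ++ [']'] = "[X]".toList) = (x = "[X".toList) := by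
  have h2 : "[X".toList = ['[','X'] := by decide
  rw [h2]
  apply propext
  constructor
  · intro h; have := congrArg List.dropLast h; simpa using this
  · intro h; subst h; rfl

theorem inner_eq (line : List Char) (row : Int) (g : List (Int × Int)) :
    ((get_cell_value line).foldl
        (fun (st2 : List (Int × Int) × Int) elem =>
          (if elem = "[X]".toList then st2.1 ++ [(row, st2.2)] else st2.1, st2.2 + 1))
        (g, (0 : Int))).1
      = (PySem.List.enumerate
            (PySem.List.slice (PySem.Chars.splitOn line [']']) none (some (-1))) 0).foldl
          (fun g2 cp => if cp.2 = "[X".toList then g2 ++ [(row, cp.1)] else g2) g := by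
  rw [counter_fold (fun c g2 elem => if elem = "[X]".toList then g2 ++ [(row, c)] else g2)]
  rw [get_cell_value_eq, slice_neg_one, enumerate_map, List.foldl_map]
  apply PySem.List.foldl_congr_mem
  intro b p _
  simp only [suffix_test]

-- ===== VERDICT (by name: the statement is the Claim_ definition above) =====
theorem construct_initial_grid_spec : Claim_equal_construct_initial_grid := by
  intro s _
  unfold Spec_construct_initial_grid construct_initial_grid construct_initial_grid_alt
  rw [counter_fold (fun (r : Int) (g : List (Int × Int)) (line : List Char) =>
        ((get_cell_value line).foldl
          (fun (st2 : List (Int × Int) × Int) elem =>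
            (if elem = "[X]".toList then st2.1 ++ [(r, st2.2)] else st2.1, st2.2 + 1))
          (g, (0 : Int))).1)]
  apply PySem.List.foldl_congr_mem
  intro g rl _
  exact inner_eq rl.2 rl.1 g
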